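-- pv_equiv track=rewrite | github.com/sachin-deshik-10/O-RAN-Security-Test-Case-Generator | app.py | concat_nouns
-- ===== SOURCE A (Python) =====
-- def concat_nouns(ents):
--     nouns = []
--     left = 0
--     word = ""
--     while left < len(ents):
--         while left < len(ents):
--             if ents[left]["label"] != "NOUN":
--                 break
--             word += f"{ents[left]['word']} "
--             left += 1
--
--         if word:
--             nouns.append(word)
--             word = ""
--
--         left += 1
--
--     return nouns
-- ===== SOURCE B (Python) =====
-- def concat_nouns(ents):
--     out = []
--     run = None  # NOUN-run string being built right-to-left, or None
--     for e in reversed(ents):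
--         if e["label"] == "NOUN":
--             run = e["word"] + " " + (run if run is not None else "")
--         elif run is not None:
--             out.append(run)
--             run = None
--     if run is not None:
--         out.append(run)
--     out.reverse()
--     return out
-- ===== Notes on version B (the rewrite author's own statement) =====
-- stated objective: alternative
-- what changed: Replaces A's forward nested while-loops with an index and skip step by a single right-to-left pass: each NOUN run string is built back-to-front in an optional accumulator, flushed when a non-NOUN token appears, and the collected list is reversed at the end.
import Mathlib
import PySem

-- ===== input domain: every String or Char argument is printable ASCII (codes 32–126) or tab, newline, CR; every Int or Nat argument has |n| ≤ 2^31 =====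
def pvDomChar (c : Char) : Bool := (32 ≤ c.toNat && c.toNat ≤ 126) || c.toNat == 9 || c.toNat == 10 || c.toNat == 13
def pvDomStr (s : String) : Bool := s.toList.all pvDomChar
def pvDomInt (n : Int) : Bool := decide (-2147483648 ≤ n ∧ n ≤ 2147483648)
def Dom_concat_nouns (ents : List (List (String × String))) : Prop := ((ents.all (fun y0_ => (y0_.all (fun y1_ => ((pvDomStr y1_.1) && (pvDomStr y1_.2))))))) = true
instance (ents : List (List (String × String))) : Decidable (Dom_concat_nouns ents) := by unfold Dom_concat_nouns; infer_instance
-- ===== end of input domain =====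

-- B makes a single right-to-left pass, building each NOUN-run string back-to-front in an
-- optional accumulator and flushing it on a non-NOUN token, then reverses the result,
-- instead of A's forward nested while-loops with a manual index; same cost, alternative structure.

-- shared dict-access helpers: ents[i]["label"] / ents[i]["word"] (Pre_ guarantees the keys are present)
def pvLabel (e : List (String × String)) : String := PySem.Dict.getD (PySem.Dict.mk e) "label" ""
def pvWord (e : List (String × String)) : String := PySem.Dict.getD (PySem.Dict.mk e) "word" ""

-- ===== PORT A =====
-- inner while loop: consume consecutive NOUN tokens, accumulating `word`
def pvTakeNouns : List (List (String × String)) → String → String × List (List (String × String))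
  | [], w => (w, [])
  | e :: rest, w =>
    if pvLabel e ≠ "NOUN" then (w, e :: rest)
    else pvTakeNouns rest (w ++ pvWord e ++ " ")

theorem pvTakeNouns_snd_len : ∀ (l : List (List (String × String))) (w : String),
    (pvTakeNouns l w).2.length ≤ l.length := by
  intro l
  induction l with
  | nil => intro w; simp [pvTakeNouns]
  | cons e rest ih =>
    intro w
    simp only [pvTakeNouns]
    split
    · simp
    · exact le_trans (ih _) (by simp)

-- outer while loop: state (remaining list ~ left, word, nouns)
def pvOuterA : List (List (String × String)) → String → List String → List String
  | [], _, nouns => nouns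
  | e :: rest, word, nouns =>
    let p := pvTakeNouns (e :: rest) word
    pvOuterA p.2.tail "" (if p.1 ≠ "" then nouns ++ [p.1] else nouns)
termination_by l _ _ => l.length
decreasing_by
  have h := pvTakeNouns_snd_len (e :: rest) word
  simp only [List.length_tail, List.length_cons] at *
  omega

def concat_nouns (ents : List (List (String × String))) : List String :=
  pvOuterA ents "" []

-- ===== PORT B =====
-- loop body of `for e in reversed(ents)`: state (out, run) with run : Option String
def pvStepB (acc : List String × Option String) (e : List (String × String)) :
    List String × Option String :=
  if pvLabel e = "NOUN" then (acc.1, some (pvWord e ++ " " ++ acc.2.getD ""))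
  else
    match acc.2 with
    | some r => (acc.1 ++ [r], none)
    | none => acc

def concat_nouns_alt (ents : List (List (String × String))) : List String :=
  let p := ents.reverse.foldl pvStepB ([], none)
  (match p.2 with
   | some r => p.1 ++ [r]
   | none => p.1).reverse

-- ===== PRECONDITION & SPEC =====
-- Pre_ excludes exactly the inputs where Python A raises KeyError: a token without a "label" key,
-- or a NOUN-labeled token without a "word" key.
def Pre_concat_nouns (ents : List (List (String × String))) : Prop :=
  ∀ e ∈ ents, ((PySem.Dict.mk e).get? "label").isSome ∧
    ((PySem.Dict.mk e).get? "label" = some "NOUN" → ((PySem.Dict.mk e).get? "word").isSome)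
instance (ents : List (List (String × String))) : Decidable (Pre_concat_nouns ents) := by
  unfold Pre_concat_nouns; infer_instance

def pvWitness_concat_nouns : (List (List (String × String))) :=
  [[("label", "NOUN"), ("word", "hi")], [("label", "VERB"), ("word", "go")]]

def Spec_concat_nouns (ents : List (List (String × String))) (out : List String) : Prop := out = concat_nouns_alt ents
instance (ents : List (List (String × String))) (out : List String) : Decidable (Spec_concat_nouns ents out) := by unfold Spec_concat_nouns; infer_instance

-- ===== CLAIM (what is proved, stated in full; the proofs are below) =====
def Claim_equal_concat_nouns : Prop := ∀ (ents : List (List (String × String))), Dom_concat_nouns ents → Pre_concat_nouns ents → Spec_concat_nouns ents (concat_nouns ents)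

-- ===== LEMMAS AND PROOFS =====

-- proof-side reference function: the list of joined maximal NOUN runs
def pvTakeRun : List (List (String × String)) → List (List (String × String)) × List (List (String × String))
  | [] => ([], [])
  | e :: rest =>
    if pvLabel e = "NOUN" then
      let p := pvTakeRun rest
      (e :: p.1, p.2)
    else ([], e :: rest)

theorem pvTakeRun_snd_len : ∀ (l : List (List (String × String))),
    (pvTakeRun l).2.length ≤ l.length := by
  intro l
  induction l with
  | nil => simp [pvTakeRun]
  | cons e rest ih =>
    simp only [pvTakeRun]
    split
    · exact le_trans ih (by simp)
    · simp

-- "".join of a run, left-to-right with an accumulator (A's shape)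
def pvJoin2 (w : String) (g : List (List (String × String))) : String :=
  g.foldl (fun s e => s ++ pvWord e ++ " ") w

-- the same string built back-to-front (B's shape)
def pvJoinR : List (List (String × String)) → String
  | [] => ""
  | e :: g => pvWord e ++ " " ++ pvJoinR g

def pvRef : List (List (String × String)) → List String
  | [] => []
  | e :: rest =>
    if pvLabel e = "NOUN" then
      pvJoin2 "" (e :: (pvTakeRun rest).1) :: pvRef (pvTakeRun rest).2
    else pvRef rest
termination_by l => l.length
decreasing_by
  · have h := pvTakeRun_snd_len rest
    simp only [List.length_cons]; omega
  · simp

theorem pvJoin2_eq_joinR : ∀ (g : List (List (String × String))) (w : String),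
    pvJoin2 w g = w ++ pvJoinR g := by
  intro g
  induction g with
  | nil => intro w; simp [pvJoin2, pvJoinR]
  | cons e rest ih =>
    intro w
    simp only [pvJoin2, List.foldl_cons, pvJoinR] at *
    rw [ih]
    simp [String.append_assoc]

-- ---- A's side: pvOuterA computes pvRef ----

theorem pvTakeNouns_eq_run : ∀ (l : List (List (String × String))) (w : String),
    pvTakeNouns l w = (pvJoin2 w (pvTakeRun l).1, (pvTakeRun l).2) := by
  intro l
  induction l with
  | nil => intro w; simp [pvTakeNouns, pvTakeRun, pvJoin2]
  | cons e rest ih =>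
    intro w
    simp only [pvTakeNouns, pvTakeRun]
    by_cases h : pvLabel e = "NOUN"
    · simp only [h, ne_eq, not_true_eq_false, if_false, if_true, ih]
      rfl
    · simp [h, pvJoin2]

theorem pvJoin2_len (g : List (List (String × String))) : ∀ (w : String),
    w.length ≤ (pvJoin2 w g).length := by
  induction g with
  | nil => intro w; simp [pvJoin2]
  | cons e rest ih =>
    intro w
    have h := ih (w ++ pvWord e ++ " ")
    simp only [pvJoin2, List.foldl_cons] at *
    simp only [String.length_append] at h
    omega

theorem pvJoin2_cons_ne_empty (e : List (String × String)) (g : List (List (String × String))) :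
    pvJoin2 "" (e :: g) ≠ "" := by
  intro hcontra
  have h := pvJoin2_len g ("" ++ pvWord e ++ " ")
  have : pvJoin2 "" (e :: g) = pvJoin2 ("" ++ pvWord e ++ " ") g := rfl
  rw [this] at hcontra
  rw [hcontra] at h
  simp [String.length_append] at h

-- the tail left by a run never starts with a NOUN-labeled token
theorem pvTakeRun_snd_head : ∀ (l f : _) (ts : _),
    (pvTakeRun l).2 = f :: ts → pvLabel f ≠ "NOUN" := by
  intro l
  induction l with
  | nil => intro f ts h; simp [pvTakeRun] at h
  | cons e rest ih =>
    intro f ts h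
    simp only [pvTakeRun] at h
    split at h
    · exact ih f ts h
    · next hne =>
      obtain ⟨rfl, -⟩ := List.cons.injEq .. ▸ h
      simpa using hne

theorem pvRef_skip (e : List (String × String)) (rest : List (List (String × String)))
    (h : pvLabel e ≠ "NOUN") : pvRef (e :: rest) = pvRef rest := by
  rw [pvRef, if_neg h]

theorem pvRef_noun (e : List (String × String)) (rest : List (List (String × String)))
    (h : pvLabel e = "NOUN") :
    pvRef (e :: rest) = pvJoin2 "" (e :: (pvTakeRun rest).1) :: pvRef (pvTakeRun rest).2 := by
  rw [pvRef, if_pos h]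

-- pvRef is unchanged when we drop the head of a run tail (it is empty or non-NOUN headed)
theorem pvRef_tail_of_run (rest : List (List (String × String))) :
    pvRef (pvTakeRun rest).2.tail = pvRef (pvTakeRun rest).2 := by
  cases hrun : (pvTakeRun rest).2 with
  | nil => simp
  | cons f ts =>
    have hf := pvTakeRun_snd_head rest f ts hrun
    simp only [List.tail_cons]
    exact (pvRef_skip f ts hf).symm

-- main invariant for A's outer loop
theorem outerA_eq_ref : ∀ (n : Nat) (l : List (List (String × String))), l.length ≤ n →
    ∀ (nouns : List String), pvOuterA l "" nouns = nouns ++ pvRef l := by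
  intro n
  induction n with
  | zero =>
    intro l hl nouns
    have : l = [] := List.length_eq_zero_iff.mp (Nat.le_zero.mp hl)
    subst this
    simp [pvOuterA, pvRef]
  | succ n ih =>
    intro l hl nouns
    cases l with
    | nil => simp [pvOuterA, pvRef]
    | cons e rest =>
      by_cases h : pvLabel e = "NOUN"
      · have hTN : pvTakeNouns (e :: rest) ""
            = (pvJoin2 "" (e :: (pvTakeRun rest).1), (pvTakeRun rest).2) := by
          rw [pvTakeNouns_eq_run]
          simp [pvTakeRun, h]
        have hne := pvJoin2_cons_ne_empty e (pvTakeRun rest).1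
        have hlen : (pvTakeRun rest).2.tail.length ≤ n := by
          have h1 := pvTakeRun_snd_len rest
          have h2 : (pvTakeRun rest).2.tail.length = (pvTakeRun rest).2.length - 1 := List.length_tail
          simp only [List.length_cons] at hl
          omega
        have hA : pvOuterA (e :: rest) "" nouns
            = pvOuterA (pvTakeRun rest).2.tail ""
                (nouns ++ [pvJoin2 "" (e :: (pvTakeRun rest).1)]) := by
          rw [pvOuterA]
          simp only [hTN]
          rw [if_pos hne]
        rw [hA, ih _ hlen, pvRef_tail_of_run, pvRef_noun e rest h, List.append_assoc]
        rfl
      · have hTN : pvTakeNouns (e :: rest) "" = ("", e :: rest) := by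
          simp [pvTakeNouns, h]
        have hA : pvOuterA (e :: rest) "" nouns = pvOuterA rest "" nouns := by
          rw [pvOuterA]
          simp [hTN]
        have hlen : rest.length ≤ n := by simp only [List.length_cons] at hl; omega
        rw [hA, ih _ hlen, pvRef_skip e rest h]

-- ---- B's side: the reversed foldl computes pvRef ----

def pvG (l : List (List (String × String))) : List String × Option String :=
  l.foldr (fun e acc => pvStepB acc e) ([], none)

-- whether the list starts with a NOUN-labeled token
def pvHeadNoun : List (List (String × String)) → Bool
  | [] => false
  | e :: _ => pvLabel e == "NOUN"

theorem pvG_inv : ∀ (l : List (List (String × String))),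
    (pvHeadNoun l = true →
      pvG l = ((pvRef (pvTakeRun l).2).reverse, some (pvJoinR (pvTakeRun l).1))) ∧
    (pvHeadNoun l = false → pvG l = ((pvRef l).reverse, none)) := by
  intro l
  induction l with
  | nil =>
    exact ⟨by simp [pvHeadNoun], fun _ => by simp [pvG, pvRef]⟩
  | cons e rest ih =>
    obtain ⟨ihT, ihF⟩ := ih
    have hstep : pvG (e :: rest) = pvStepB (pvG rest) e := rfl
    constructor
    · intro hh
      have h : pvLabel e = "NOUN" := by simpa [pvHeadNoun] using hh
      rw [hstep]
      cases hr : pvHeadNoun rest with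
      | true =>
        rw [ihT hr]
        simp [pvStepB, h, pvTakeRun, pvJoinR]
      | false =>
        rw [ihF hr]
        have hrest : pvTakeRun rest = ([], rest) := by
          cases rest with
          | nil => simp [pvTakeRun]
          | cons f ts =>
            have : ¬ pvLabel f = "NOUN" := by simpa [pvHeadNoun] using hr
            simp [pvTakeRun, this]
        simp [pvStepB, h, pvTakeRun, hrest, pvJoinR]
    · intro hh
      have h : ¬ pvLabel e = "NOUN" := by simpa [pvHeadNoun] using hh
      rw [hstep, pvRef_skip e rest h]
      cases hr : pvHeadNoun rest with
      | false =>
        rw [ihF hr]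
        simp [pvStepB, h]
      | true =>
        rw [ihT hr]
        cases rest with
        | nil => simp [pvHeadNoun] at hr
        | cons f ts =>
          have hf : pvLabel f = "NOUN" := by simpa [pvHeadNoun] using hr
          have hrun : pvTakeRun (f :: ts) = (f :: (pvTakeRun ts).1, (pvTakeRun ts).2) := by
            simp [pvTakeRun, hf]
          rw [hrun, pvRef_noun f ts hf]
          simp [pvStepB, h, pvJoin2_eq_joinR, pvJoinR]

theorem alt_eq_ref (ents : List (List (String × String))) :
    concat_nouns_alt ents = pvRef ents := by
  have hfold : ents.reverse.foldl pvStepB ([], none) = pvG ents := by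
    rw [List.foldl_reverse]; rfl
  unfold concat_nouns_alt
  rw [hfold]
  cases hh : pvHeadNoun ents with
  | true =>
    rw [(pvG_inv ents).1 hh]
    cases ents with
    | nil => simp [pvHeadNoun] at hh
    | cons e rest =>
      have he : pvLabel e = "NOUN" := by simpa [pvHeadNoun] using hh
      have hrun : pvTakeRun (e :: rest) = (e :: (pvTakeRun rest).1, (pvTakeRun rest).2) := by
        simp [pvTakeRun, he]
      rw [hrun, pvRef_noun e rest he]
      simp [pvJoin2_eq_joinR]
  | false =>
    rw [(pvG_inv ents).2 hh]
    simp

-- ===== VERDICT (by name: the statement is the Claim_ definition above) =====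
theorem concat_nouns_spec : Claim_equal_concat_nouns := by
  intro ents _ _
  unfold Spec_concat_nouns concat_nouns
  rw [alt_eq_ref]
  simpa using outerA_eq_ref ents.length ents le_rfl []
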